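-- pv_equiv track=rewrite | github.com/DanVano/Credit_Card_History | utilities.py | categorize_expenses
-- ===== SOURCE A (Python) =====
-- def categorize_expenses(credit_info, categories):
--     categorized_expenses = {}
--     # Use this later in a table
--     other_expenses = {}
--
--     # Iterate over each item in credit_info
--     for description, amount in credit_info.items():
--         found = False
--
--         # Iterate over each category
--         for category_name, keywords in categories.items():
--             # Check if any keyword is in the description
--             if any(keyword.lower() in description.lower() for keyword in keywords):
--                 categorized_expenses[category_name] = categorized_expenses.get(category_name, 0) + amount
--                 found = True
--
--         # If no keyword was found in the description, add to "Other"
--         if not found: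
--             other_expenses["Other"] = other_expenses.get("Other", 0) + amount
--
--     # Combine categorized and other expenses
--     # Unpack the dict with keys and values with **
--     categorized_expenses = {**categorized_expenses, **other_expenses}
--
--     return categorized_expenses, other_expenses
-- ===== SOURCE B (Python) =====
-- def categorize_expenses(credit_info, categories):
--     # Precompute lowercase once per keyword and per description, then build a
--     # flat event stream (category, amount) and aggregate it in a single pass.
--     lowered = [(name, [kw.lower() for kw in kws]) for name, kws in categories.items()]
--     descs = [(description.lower(), amount) for description, amount in credit_info.items()]
--     events = [(name, amount) for d, amount in descs
--               for name, lkws in lowered if any(kw in d for kw in lkws)]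
--     misses = [amount for d, amount in descs
--               if not any(any(kw in d for kw in lkws) for _, lkws in lowered)]
--     categorized = {}
--     for name, amount in events:
--         categorized[name] = categorized.get(name, 0) + amount
--     other = {"Other": sum(misses)} if misses else {}
--     return {**categorized, **other}, other
-- ===== Notes on version B (the rewrite author's own statement) =====
-- stated objective: alternative
-- what changed: B precomputes the lowercase of every keyword and every description once, builds a flat (category, amount) event stream and the missed-amount list with comprehensions, and aggregates them in separate single passes, instead of A's single loop that re-lowercases per keyword and threads two dicts and a found flag.
import Mathlib
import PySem

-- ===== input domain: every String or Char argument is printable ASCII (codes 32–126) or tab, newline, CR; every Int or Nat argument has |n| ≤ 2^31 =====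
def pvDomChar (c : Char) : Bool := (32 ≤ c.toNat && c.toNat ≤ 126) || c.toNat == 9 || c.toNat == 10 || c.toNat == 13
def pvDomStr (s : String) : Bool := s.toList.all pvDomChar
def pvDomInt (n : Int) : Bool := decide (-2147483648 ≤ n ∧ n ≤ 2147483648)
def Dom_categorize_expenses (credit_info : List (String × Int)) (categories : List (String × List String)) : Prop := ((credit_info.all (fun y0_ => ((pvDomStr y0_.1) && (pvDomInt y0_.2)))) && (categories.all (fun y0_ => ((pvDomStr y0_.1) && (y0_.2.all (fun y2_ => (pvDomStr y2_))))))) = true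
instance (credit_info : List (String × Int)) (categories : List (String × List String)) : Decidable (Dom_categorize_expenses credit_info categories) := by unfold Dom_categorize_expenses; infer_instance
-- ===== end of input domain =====

-- B precomputes the lowercase of every keyword and description once and builds a flat
-- (category, amount) event stream that is aggregated in a separate single pass
-- (objective: alternative decomposition of the same O(D·K·L) matching work).


-- ===== PORT A =====
-- literal transliteration of A: one pass over credit_info maintaining two dicts and a found flag
def categorize_expenses (credit_info : List (String × Int)) (categories : List (String × List String)) : (List (String × Int)) × (List (String × Int)) :=
  let st := credit_info.foldl (fun (st : PySem.Dict String Int × PySem.Dict String Int) item =>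
    let inner := categories.foldl (fun (st2 : PySem.Dict String Int × Bool) c =>
        if c.2.any (fun kw => PySem.Str.isIn (PySem.Str.lower kw) (PySem.Str.lower item.1)) then
          (st2.1.insert c.1 (st2.1.getD c.1 0 + item.2), true)
        else st2) (st.1, false)
    if inner.2 then (inner.1, st.2)
    else (inner.1, st.2.insert "Other" (st.2.getD "Other" 0 + item.2)))
    (PySem.Dict.empty, PySem.Dict.empty)
  -- {**categorized_expenses, **other_expenses}
  let merged := st.2.items.foldl (fun (d : PySem.Dict String Int) kv => d.insert kv.1 kv.2) st.1
  (merged.items, st.2.items)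

-- ===== PORT B =====
-- transliteration of Source B: comprehensions (maps/filters) building an event stream, then one aggregation fold
def categorize_expenses_alt (credit_info : List (String × Int)) (categories : List (String × List String)) : (List (String × Int)) × (List (String × Int)) :=
  let lowered := categories.map (fun c => (c.1, c.2.map PySem.Str.lower))
  let descs := credit_info.map (fun p => (PySem.Str.lower p.1, p.2))
  let events := descs.flatMap (fun p =>
    (lowered.filter (fun c => c.2.any (fun kw => PySem.Str.isIn kw p.1))).map (fun c => (c.1, p.2)))
  let misses := (descs.filter (fun p =>
    !(lowered.any (fun c => c.2.any (fun kw => PySem.Str.isIn kw p.1))))).map (fun p => p.2)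
  let categorized := events.foldl (fun (d : PySem.Dict String Int) e => d.insert e.1 (d.getD e.1 0 + e.2)) PySem.Dict.empty
  let other : PySem.Dict String Int :=
    if misses.isEmpty then PySem.Dict.empty else PySem.Dict.empty.insert "Other" misses.sum
  let merged := other.items.foldl (fun (d : PySem.Dict String Int) kv => d.insert kv.1 kv.2) categorized
  (merged.items, other.items)

-- ===== PRECONDITION & SPEC =====
def Spec_categorize_expenses (credit_info : List (String × Int)) (categories : List (String × List String)) (out : (List (String × Int)) × (List (String × Int))) : Prop := out = categorize_expenses_alt credit_info categories
instance (credit_info : List (String × Int)) (categories : List (String × List String)) (out : (List (String × Int)) × (List (String × Int))) : Decidable (Spec_categorize_expenses credit_info categories out) := by unfold Spec_categorize_expenses; infer_instance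

-- ===== CLAIM (what is proved, stated in full; the proofs are below) =====
def Claim_equal_categorize_expenses : Prop := ∀ (credit_info : List (String × Int)) (categories : List (String × List String)), Dom_categorize_expenses credit_info categories → Spec_categorize_expenses credit_info categories (categorize_expenses credit_info categories)

-- ===== LEMMAS AND PROOFS =====

-- the (raw, un-lowered) match predicate both programs decide for a description d and a category c
def pvMatch (d : String) (c : String × List String) : Bool :=
  c.2.any (fun kw => PySem.Str.isIn (PySem.Str.lower kw) (PySem.Str.lower d))

-- A's inner loop over categories = add the amount to every matching category, found = any match
theorem pvInnerEq (categories : List (String × List String)) (d : String) (amt : Int)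
    (cat : PySem.Dict String Int) (found : Bool) :
    categories.foldl (fun (st2 : PySem.Dict String Int × Bool) c =>
        if c.2.any (fun kw => PySem.Str.isIn (PySem.Str.lower kw) (PySem.Str.lower d)) then
          (st2.1.insert c.1 (st2.1.getD c.1 0 + amt), true)
        else st2) (cat, found)
      = (((categories.filter (pvMatch d)).map (fun c => (c.1, amt))).foldl
           (fun (dd : PySem.Dict String Int) e => dd.insert e.1 (dd.getD e.1 0 + e.2)) cat,
         found || categories.any (pvMatch d)) := by
  induction categories generalizing cat found with
  | nil => simp
  | cons c cs ih =>
    simp only [List.foldl_cons, List.filter_cons, List.any_cons]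
    by_cases h : pvMatch d c = true
    · have h' := h; simp only [pvMatch] at h'
      rw [if_pos h', if_pos h, ih]
      simp [h]
    · have h' := h; simp only [pvMatch] at h'
      rw [if_neg h', if_neg h, ih]
      simp only [Bool.not_eq_true] at h
      simp [h]

-- the "Other" accumulation over a list of missed amounts, from a singleton dict
theorem pvOtherAcc (ms : List Int) (t : Int) :
    ms.foldl (fun (d : PySem.Dict String Int) a => d.insert "Other" (d.getD "Other" 0 + a))
        (PySem.Dict.empty.insert "Other" t)
      = PySem.Dict.empty.insert "Other" (t + ms.sum) := by
  induction ms generalizing t with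
  | nil => simp
  | cons a ms ih =>
    simp only [List.foldl_cons, List.sum_cons]
    rw [PySem.Dict.getD_insert_self]
    rw [PySem.Dict.insert_insert_self]
    rw [ih]
    ring_nf

-- A's outer loop, fully generalized over both pieces of state
theorem pvOuterEq (credit_info : List (String × Int)) (categories : List (String × List String))
    (cat other : PySem.Dict String Int) :
    credit_info.foldl (fun (st : PySem.Dict String Int × PySem.Dict String Int) item =>
      let inner := categories.foldl (fun (st2 : PySem.Dict String Int × Bool) c =>
          if c.2.any (fun kw => PySem.Str.isIn (PySem.Str.lower kw) (PySem.Str.lower item.1)) then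
            (st2.1.insert c.1 (st2.1.getD c.1 0 + item.2), true)
          else st2) (st.1, false)
      if inner.2 then (inner.1, st.2)
      else (inner.1, st.2.insert "Other" (st.2.getD "Other" 0 + item.2))) (cat, other)
    = ((credit_info.flatMap (fun p =>
          ((categories.filter (pvMatch p.1)).map (fun c => (c.1, p.2))))).foldl
            (fun (dd : PySem.Dict String Int) e => dd.insert e.1 (dd.getD e.1 0 + e.2)) cat,
       ((credit_info.filter (fun p => !(categories.any (pvMatch p.1)))).map (fun p => p.2)).foldl
            (fun (d : PySem.Dict String Int) a => d.insert "Other" (d.getD "Other" 0 + a)) other) := by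
  induction credit_info generalizing cat other with
  | nil => simp
  | cons x xs ih =>
    simp only [List.foldl_cons, List.flatMap_cons, List.filter_cons, List.foldl_append]
    rw [pvInnerEq]
    simp only [Bool.false_or]
    by_cases h : (categories.any (pvMatch x.1)) = true
    · rw [if_pos h, if_neg (by simp [h]), ih]
    · have h' : categories.any (pvMatch x.1) = false := by
        simpa using h
      rw [if_neg h, if_pos (by simp [h']), List.map_cons, List.foldl_cons, ih]

-- the "Other" loop from the empty dict is {} or {"Other": sum}
theorem pvOtherEq (ms : List Int) :
    ms.foldl (fun (d : PySem.Dict String Int) a => d.insert "Other" (d.getD "Other" 0 + a))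
        PySem.Dict.empty
      = if ms.isEmpty then PySem.Dict.empty else PySem.Dict.empty.insert "Other" ms.sum := by
  cases ms with
  | nil => rfl
  | cons a ms =>
    simp only [List.foldl_cons, List.isEmpty_cons, PySem.Dict.getD_empty, List.sum_cons]
    rw [pvOtherAcc]
    ring_nf
    simp

theorem categorize_expenses_eq (credit_info : List (String × Int)) (categories : List (String × List String)) :
    categorize_expenses credit_info categories = categorize_expenses_alt credit_info categories := by
  unfold categorize_expenses categorize_expenses_alt
  rw [pvOuterEq]
  simp only [List.flatMap_map, List.filter_map, List.map_map, List.any_map, Function.comp_def]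
  rw [pvOtherEq]
  rfl

-- ===== VERDICT (by name: the statement is the Claim_ definition above) =====
theorem categorize_expenses_spec : Claim_equal_categorize_expenses := by
  intro ci cats _
  exact categorize_expenses_eq ci cats
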